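-- pv_equiv track=rewrite | github.com/jgraeb/MergeUnitTests | intersection/specifications.py | collision_safety
-- ===== SOURCE A (Python) =====
-- def collision_safety(y_min_grid, y_max_grid, z_min_grid, z_max_grid, crosswalk):
--     '''
--     Create the specifications to ensure no collisions between the agents.
--     '''
--     tester_safe = set()
--     sys_safe = set()
--     # No collision with other vehicles:
--     for zi in range(z_min_grid,z_max_grid):
--         for yi in range(y_min_grid, y_max_grid):
--             cw_num = []
--             for loc in crosswalk.keys():
--                 # st()
--                 if crosswalk[loc] == (yi, zi):
--                     cw_num.append(loc)
--                 ped_string = ''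
--                 for item in cw_num:
--                     if ped_string == '':
--                         ped_string = ped_string + '(p = '+str(item)+')'
--                     else:
--                         ped_string = ped_string + ' || (p = '+str(item)+')'
--
--             tester_safe |= {'(y = '+str(yi)+' && z = '+str(zi)+') -> X(!(y1 = '+str(yi)+' && z1 = '+str(zi)+'))'}
--             sys_safe |= {'(y1 = '+str(yi)+' && z1 = '+str(zi)+') -> X(!(y = '+str(yi)+' && z = '+str(zi)+ '))'}
--
--             if not ped_string == '':
--                 tester_safe |= {'!(y1 = '+str(yi)+' && z1 = '+str(zi)+' && '+str(ped_string)+')'}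
--                 tester_safe |= {'(y = '+str(yi)+' && z = '+str(zi)+') -> X(!('+str(ped_string)+'))'}
--                 sys_safe |= {'('+str(ped_string)+') -> X(!(y='+str(yi)+' && z = '+str(zi)+ '))'}
--
--
--             # check for pedestrian
--     return tester_safe, sys_safe
-- ===== SOURCE B (Python) =====
-- def collision_safety(y_min_grid, y_max_grid, z_min_grid, z_max_grid, crosswalk):
--     '''
--     Create the specifications to ensure no collisions between the agents.
--     Staged: invert crosswalk into a (y,z)->locations index, compute each
--     cell's spec lists independently, then flatten the lists into the sets.
--     '''
--     by_cell = {}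
--     for loc, cell in crosswalk.items():
--         by_cell.setdefault(cell, []).append(loc)
--
--     def cell_specs(yi, zi):
--         yz = 'y = %s && z = %s' % (yi, zi)
--         yz1 = 'y1 = %s && z1 = %s' % (yi, zi)
--         tester = ['(%s) -> X(!(%s))' % (yz, yz1)]
--         sys_ = ['(%s) -> X(!(%s))' % (yz1, yz)]
--         locs = by_cell.get((yi, zi), [])
--         if locs:
--             ped = ' || '.join('(p = %s)' % (k,) for k in locs)
--             tester += ['!(%s && %s)' % (yz1, ped), '(%s) -> X(!(%s))' % (yz, ped)]
--             sys_ += ['(%s) -> X(!(y=%s && z = %s))' % (ped, yi, zi)]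
--         return tester, sys_
--
--     cells = [(yi, zi) for zi in range(z_min_grid, z_max_grid)
--                       for yi in range(y_min_grid, y_max_grid)]
--     specs = [cell_specs(yi, zi) for yi, zi in cells]
--     tester_safe = set()
--     sys_safe = set()
--     for t, s in specs:
--         for f in t:
--             tester_safe |= {f}
--         for f in s:
--             sys_safe |= {f}
--     return tester_safe, sys_safe
-- ===== Notes on version B (the rewrite author's own statement) =====
-- stated objective: alternative
-- what changed: B is staged: it inverts the crosswalk dict once into a (y,z)->locations index, computes each cell's spec lists as pure per-cell values (one join per cell, no threaded set state), and flattens the per-cell lists into the two sets at the end, instead of A's single stateful sweep that rescans the whole crosswalk for every cell and rebuilds the pedestrian string from scratch after every crosswalk entry; Pre_ only excludes the inputs (nonempty grid, empty crosswalk) on which A raises UnboundLocalError.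
import Mathlib
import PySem

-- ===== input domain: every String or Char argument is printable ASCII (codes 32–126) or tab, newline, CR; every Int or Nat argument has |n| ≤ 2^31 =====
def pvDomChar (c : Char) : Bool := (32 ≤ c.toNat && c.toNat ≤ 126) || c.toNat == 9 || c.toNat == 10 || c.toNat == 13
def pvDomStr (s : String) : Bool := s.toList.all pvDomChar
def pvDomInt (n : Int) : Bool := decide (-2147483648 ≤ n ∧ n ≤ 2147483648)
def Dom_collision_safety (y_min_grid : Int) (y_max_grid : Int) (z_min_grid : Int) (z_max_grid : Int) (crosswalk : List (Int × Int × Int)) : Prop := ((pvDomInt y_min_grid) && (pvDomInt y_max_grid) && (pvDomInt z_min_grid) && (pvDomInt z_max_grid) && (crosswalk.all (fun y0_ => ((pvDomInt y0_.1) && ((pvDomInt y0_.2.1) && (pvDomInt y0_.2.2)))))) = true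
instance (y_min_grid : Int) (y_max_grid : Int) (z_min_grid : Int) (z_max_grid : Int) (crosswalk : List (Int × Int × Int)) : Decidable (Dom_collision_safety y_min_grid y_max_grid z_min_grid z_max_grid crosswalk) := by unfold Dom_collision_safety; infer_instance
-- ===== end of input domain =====

-- B is a staged re-implementation: it inverts the crosswalk into a (y,z)->locations index once,
-- computes each cell's spec lists independently (no threaded set state, one join per cell),
-- and only at the end flattens the per-cell lists into the two sets — instead of A's single
-- stateful sweep that rescans the whole crosswalk per cell and rebuilds the pedestrian string
-- from scratch after every crosswalk entry.
-- The Python 'crosswalk' parameter is a dict; both ports decode the association list with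
-- dict semantics (later duplicate keys overwrite in place) via pvCwDict.
def pvCwDict (crosswalk : List (Int × Int × Int)) : PySem.Dict Int (Int × Int) :=
  crosswalk.foldl (fun d p => d.insert p.1 p.2) PySem.Dict.empty

-- ===== PORT A =====
-- the inner 'for item in cw_num' loop that rebuilds ped_string from '' on each crosswalk entry
def csA_ped (cw_num : List Int) : String :=
  cw_num.foldl (fun ped item =>
    if ped == "" then ped ++ "(p = " ++ PySem.Int.toStr item ++ ")"
    else ped ++ " || (p = " ++ PySem.Int.toStr item ++ ")") ""

-- one grid cell of A's doubly nested loop; state = (tester_safe, sys_safe, ped_string).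
-- ped_string is a function-scoped Python variable read after the crosswalk loop, so it is
-- threaded through the state (its initial value is only read outside Pre_, where A raises).
def csA_cell (items : List (Int × Int × Int)) (zi yi : Int)
    (st : PySem.Set String × PySem.Set String × String) :
    PySem.Set String × PySem.Set String × String :=
  let inner := items.foldl (fun (s : List Int × String) loc =>
      let cw_num := if loc.2 == (yi, zi) then s.1 ++ [loc.1] else s.1
      (cw_num, csA_ped cw_num)) (([] : List Int), st.2.2)
  let ped := inner.2
  let tester := st.1.add ("(y = " ++ PySem.Int.toStr yi ++ " && z = " ++ PySem.Int.toStr zi ++ ") -> X(!(y1 = " ++ PySem.Int.toStr yi ++ " && z1 = " ++ PySem.Int.toStr zi ++ "))")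
  let sys := st.2.1.add ("(y1 = " ++ PySem.Int.toStr yi ++ " && z1 = " ++ PySem.Int.toStr zi ++ ") -> X(!(y = " ++ PySem.Int.toStr yi ++ " && z = " ++ PySem.Int.toStr zi ++ "))")
  if !(ped == "") then
    let tester := tester.add ("!(y1 = " ++ PySem.Int.toStr yi ++ " && z1 = " ++ PySem.Int.toStr zi ++ " && " ++ ped ++ ")")
    let tester := tester.add ("(y = " ++ PySem.Int.toStr yi ++ " && z = " ++ PySem.Int.toStr zi ++ ") -> X(!(" ++ ped ++ "))")
    let sys := sys.add ("(" ++ ped ++ ") -> X(!(y=" ++ PySem.Int.toStr yi ++ " && z = " ++ PySem.Int.toStr zi ++ "))")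
    (tester, sys, ped)
  else (tester, sys, ped)

def collision_safety (y_min_grid : Int) (y_max_grid : Int) (z_min_grid : Int) (z_max_grid : Int) (crosswalk : List (Int × Int × Int)) : List String × List String :=
  let items := (pvCwDict crosswalk).items
  let st := (PySem.List.pyRange z_min_grid z_max_grid 1).foldl
    (fun st zi => (PySem.List.pyRange y_min_grid y_max_grid 1).foldl
      (fun st yi => csA_cell items zi yi st) st)
    ((PySem.Set.empty : PySem.Set String), (PySem.Set.empty : PySem.Set String), "")
  (st.1, st.2.1)

-- ===== PORT B =====
def csB_part (k : Int) : String := "(p = " ++ PySem.Int.toStr k ++ ")"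

-- 'by_cell.setdefault(cell, []).append(loc)' over all crosswalk items
def csB_index (items : List (Int × Int × Int)) : PySem.Dict (Int × Int) (List Int) :=
  items.foldl (fun bc loc => bc.modify loc.2 [] (· ++ [loc.1])) PySem.Dict.empty

-- 'cell_specs(yi, zi)': the two spec lists of one cell, computed independently of any state
def csB_cell (bc : PySem.Dict (Int × Int) (List Int)) (yi zi : Int) :
    List String × List String :=
  let yz := "y = " ++ PySem.Int.toStr yi ++ " && z = " ++ PySem.Int.toStr zi
  let yz1 := "y1 = " ++ PySem.Int.toStr yi ++ " && z1 = " ++ PySem.Int.toStr zi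
  let tester := ["(" ++ yz ++ ") -> X(!(" ++ yz1 ++ "))"]
  let sys := ["(" ++ yz1 ++ ") -> X(!(" ++ yz ++ "))"]
  match bc.getD (yi, zi) [] with
  | [] => (tester, sys)
  | locs =>
      let ped := PySem.Str.join " || " (locs.map csB_part)
      (tester ++ ["!(" ++ yz1 ++ " && " ++ ped ++ ")",
                  "(" ++ yz ++ ") -> X(!(" ++ ped ++ "))"],
       sys ++ ["(" ++ ped ++ ") -> X(!(y=" ++ PySem.Int.toStr yi ++ " && z = " ++ PySem.Int.toStr zi ++ "))"])

def collision_safety_alt (y_min_grid : Int) (y_max_grid : Int) (z_min_grid : Int) (z_max_grid : Int) (crosswalk : List (Int × Int × Int)) : List String × List String :=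
  let bc := csB_index (pvCwDict crosswalk).items
  let cells := (PySem.List.pyRange z_min_grid z_max_grid 1).flatMap (fun zi =>
    (PySem.List.pyRange y_min_grid y_max_grid 1).map (fun yi => (yi, zi)))
  let specs := cells.map (fun c => csB_cell bc c.1 c.2)
  specs.foldl (fun st p => (PySem.Set.update st.1 p.1, PySem.Set.update st.2 p.2))
    ((PySem.Set.empty : PySem.Set String), (PySem.Set.empty : PySem.Set String))

-- ===== PRECONDITION & SPEC =====
-- Pre_ excludes only inputs on which A raises UnboundLocalError: a nonempty grid with an
-- empty crosswalk, where A reads ped_string before any assignment.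
def Pre_collision_safety (y_min_grid : Int) (y_max_grid : Int) (z_min_grid : Int) (z_max_grid : Int) (crosswalk : List (Int × Int × Int)) : Prop :=
  crosswalk ≠ [] ∨ y_max_grid ≤ y_min_grid ∨ z_max_grid ≤ z_min_grid
instance (y_min_grid : Int) (y_max_grid : Int) (z_min_grid : Int) (z_max_grid : Int) (crosswalk : List (Int × Int × Int)) : Decidable (Pre_collision_safety y_min_grid y_max_grid z_min_grid z_max_grid crosswalk) := by unfold Pre_collision_safety; infer_instance
def pvWitness_collision_safety : Int × Int × Int × Int × (List (Int × Int × Int)) := (0, 1, 0, 1, [(1, 0, 0)])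

def Spec_collision_safety (y_min_grid : Int) (y_max_grid : Int) (z_min_grid : Int) (z_max_grid : Int) (crosswalk : List (Int × Int × Int)) (out : List String × List String) : Prop := out = collision_safety_alt y_min_grid y_max_grid z_min_grid z_max_grid crosswalk
instance (y_min_grid : Int) (y_max_grid : Int) (z_min_grid : Int) (z_max_grid : Int) (crosswalk : List (Int × Int × Int)) (out : List String × List String) : Decidable (Spec_collision_safety y_min_grid y_max_grid z_min_grid z_max_grid crosswalk out) := by unfold Spec_collision_safety; infer_instance

-- ===== CLAIM (what is proved, stated in full; the proofs are below) =====
def Claim_equal_collision_safety : Prop := ∀ (y_min_grid : Int) (y_max_grid : Int) (z_min_grid : Int) (z_max_grid : Int) (crosswalk : List (Int × Int × Int)), Dom_collision_safety y_min_grid y_max_grid z_min_grid z_max_grid crosswalk → Pre_collision_safety y_min_grid y_max_grid z_min_grid z_max_grid crosswalk → Spec_collision_safety y_min_grid y_max_grid z_min_grid z_max_grid crosswalk (collision_safety y_min_grid y_max_grid z_min_grid z_max_grid crosswalk)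
-- ===== LEMMAS AND PROOFS =====

-- A's inner crosswalk loop: it collects the matching locations and (when it ran at all)
-- leaves ped_string = csA_ped of the collected list.
theorem csA_inner_eq (zi yi : Int) (items : List (Int × Int × Int)) :
    ∀ (cw0 : List Int) (ped0 : String),
      items.foldl (fun (s : List Int × String) loc =>
          let cw_num := if loc.2 == (yi, zi) then s.1 ++ [loc.1] else s.1
          (cw_num, csA_ped cw_num)) (cw0, ped0)
        = (cw0 ++ (items.filter (fun loc => loc.2 == (yi, zi))).map (·.1),
           if items.isEmpty then ped0
           else csA_ped (cw0 ++ (items.filter (fun loc => loc.2 == (yi, zi))).map (·.1))) := by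
  induction items with
  | nil => simp
  | cons p rest ih =>
      intro cw0 ped0
      simp only [List.foldl_cons, List.filter_cons, List.isEmpty_cons]
      by_cases hp : (p.2 == (yi, zi)) = true
      · simp only [hp, if_true]
        rw [ih]
        cases hr : rest.isEmpty
        · simp [List.append_assoc]
        · have : rest = [] := by simpa using hr
          subst this; simp
      · simp only [hp]
        rw [ih]
        cases hr : rest.isEmpty
        · simp
        · have : rest = [] := by simpa using hr
          subst this; simp

-- helper: a join with a leading element is that element followed by sep-prefixed pieces
theorem pvJoin_cons_flatten (sep a : List Char) (rest : List (List Char)) :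
    PySem.Chars.join sep (a :: rest) = a ++ (rest.map (fun p => sep ++ p)).flatten := by
  induction rest generalizing a with
  | nil => simp [PySem.Chars.join_singleton]
  | cons b t ih =>
      rw [PySem.Chars.join_cons_cons, ih b]
      simp [List.append_assoc]

theorem csA_ped_toList (ms : List Int) :
    ∀ (s : String), s.toList ≠ [] →
      (ms.foldl (fun ped item =>
        if ped == "" then ped ++ "(p = " ++ PySem.Int.toStr item ++ ")"
        else ped ++ " || (p = " ++ PySem.Int.toStr item ++ ")") s).toList
      = s.toList ++ (ms.map (fun k => " || ".toList ++ (csB_part k).toList)).flatten := by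
  induction ms with
  | nil => intro s _; simp
  | cons m t ih =>
      intro s hs
      have hne : s ≠ "" := fun he => hs (by simp [he])
      have hbeq : (s == "") = false := by simpa using hne
      simp only [List.foldl_cons, hbeq, Bool.false_eq_true, if_false]
      rw [ih _ (by simp [hs])]
      simp [csB_part, List.append_assoc]

-- A's ped_string over the matched locations equals B's join, and is empty iff no location matched
theorem csA_ped_eq_join (ms : List Int) :
    csA_ped ms = PySem.Str.join " || " (ms.map csB_part) := by
  cases ms with
  | nil => rfl
  | cons m t =>
      apply String.toList_inj.mp
      rw [PySem.Str.toList_join, List.map_map]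
      unfold csA_ped
      have h0 : (("" : String) == "") = true := by decide
      simp only [List.foldl_cons, h0, if_true]
      rw [csA_ped_toList t ((("" : String) ++ "(p = " ++ PySem.Int.toStr m ++ ")")) (by simp)]
      rw [List.map_cons, pvJoin_cons_flatten]
      simp [csB_part, Function.comp_def, List.append_assoc]

theorem csA_ped_ne_empty (m : Int) (t : List Int) : csA_ped (m :: t) ≠ "" := by
  intro h
  have := congrArg String.toList h
  rw [show csA_ped (m :: t) = List.foldl _ (("" : String)) (m :: t) from rfl] at this
  have h0 : (("" : String) == "") = true := by decide
  simp only [List.foldl_cons, h0, if_true] at this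
  rw [csA_ped_toList t ((("" : String) ++ "(p = " ++ PySem.Int.toStr m ++ ")")) (by simp)] at this
  simp at this

-- B's index: lookup of a cell returns exactly the matched locations, in crosswalk order
theorem csB_index_getD (items : List (Int × Int × Int)) (c : Int × Int) :
    (csB_index items).getD c [] = (items.filter (fun loc => loc.2 == c)).map (·.1) := by
  unfold csB_index
  rw [show (items.foldl (fun bc loc => bc.modify loc.2 [] (· ++ [loc.1])) PySem.Dict.empty)
        = ((items.map (fun p => (p.2, p.1))).foldl
            (fun bc q => bc.modify q.1 [] (· ++ [q.2])) PySem.Dict.empty) from by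
      rw [List.foldl_map]]
  rw [PySem.Dict.getD_foldl_modify_append]
  simp [List.filter_map, Function.comp_def]

-- string re-association bridges between A's flat concatenations and B's factored yz/yz1 pieces
theorem pvStr1 (y z : String) :
    "(y = " ++ y ++ " && z = " ++ z ++ ") -> X(!(y1 = " ++ y ++ " && z1 = " ++ z ++ "))"
      = "(" ++ ("y = " ++ y ++ " && z = " ++ z) ++ ") -> X(!(" ++ ("y1 = " ++ y ++ " && z1 = " ++ z) ++ "))" := by
  apply String.toList_inj.mp; simp

theorem pvStr2 (y z : String) :
    "(y1 = " ++ y ++ " && z1 = " ++ z ++ ") -> X(!(y = " ++ y ++ " && z = " ++ z ++ "))"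
      = "(" ++ ("y1 = " ++ y ++ " && z1 = " ++ z) ++ ") -> X(!(" ++ ("y = " ++ y ++ " && z = " ++ z) ++ "))" := by
  apply String.toList_inj.mp; simp

theorem pvStr3 (y z j : String) :
    "!(y1 = " ++ y ++ " && z1 = " ++ z ++ " && " ++ j ++ ")"
      = "!(" ++ ("y1 = " ++ y ++ " && z1 = " ++ z) ++ " && " ++ j ++ ")" := by
  apply String.toList_inj.mp; simp

theorem pvStr4 (y z j : String) :
    "(y = " ++ y ++ " && z = " ++ z ++ ") -> X(!(" ++ j ++ "))"
      = "(" ++ ("y = " ++ y ++ " && z = " ++ z) ++ ") -> X(!(" ++ j ++ "))" := by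
  apply String.toList_inj.mp; simp

-- one cell: A's stateful step is exactly 'update the two sets by B's per-cell lists'
theorem cell_eq (items : List (Int × Int × Int)) (h : items ≠ []) (zi yi : Int)
    (t s : PySem.Set String) (p : String) :
    ((csA_cell items zi yi (t, s, p)).1, (csA_cell items zi yi (t, s, p)).2.1)
      = (PySem.Set.update t (csB_cell (csB_index items) yi zi).1,
         PySem.Set.update s (csB_cell (csB_index items) yi zi).2) := by
  unfold csA_cell csB_cell
  have hie : items.isEmpty = false := by simpa using h
  rw [csA_inner_eq]
  simp only [hie, Bool.false_eq_true, if_false, List.nil_append]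
  rw [csB_index_getD]
  set M := (items.filter (fun loc => loc.2 == (yi, zi))).map (·.1) with hM
  cases hMc : M with
  | nil =>
      have hpe : csA_ped [] = "" := rfl
      simp [hpe, PySem.Set.update]
      rw [pvStr1 (PySem.Int.toStr yi) (PySem.Int.toStr zi),
          pvStr2 (PySem.Int.toStr yi) (PySem.Int.toStr zi)]
      exact ⟨rfl, rfl⟩
  | cons m tl =>
      have hbeq : (csA_ped (m :: tl) == "") = false := by simpa using csA_ped_ne_empty m tl
      simp only [hbeq, Bool.not_false, if_true]
      rw [csA_ped_eq_join]
      simp [PySem.Set.update]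
      rw [pvStr1 (PySem.Int.toStr yi) (PySem.Int.toStr zi),
          pvStr2 (PySem.Int.toStr yi) (PySem.Int.toStr zi),
          pvStr3 (PySem.Int.toStr yi) (PySem.Int.toStr zi)
            (PySem.Str.join " || " (csB_part m :: List.map csB_part tl)),
          pvStr4 (PySem.Int.toStr yi) (PySem.Int.toStr zi)
            (PySem.Str.join " || " (csB_part m :: List.map csB_part tl))]
      exact ⟨rfl, rfl⟩

-- the whole grid sweep: A's nested stateful fold, projected to the two sets, is B's
-- per-cell lists flattened and pushed into the sets by a single update each
theorem cells_eq (items : List (Int × Int × Int)) (h : items ≠ [])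
    (cells : List (Int × Int)) :
    ∀ (t s : PySem.Set String) (p : String),
      ((cells.foldl (fun st c => csA_cell items c.2 c.1 st) (t, s, p)).1,
       (cells.foldl (fun st c => csA_cell items c.2 c.1 st) (t, s, p)).2.1)
        = (PySem.Set.update t ((cells.map (fun c => csB_cell (csB_index items) c.1 c.2)).flatMap (·.1)),
           PySem.Set.update s ((cells.map (fun c => csB_cell (csB_index items) c.1 c.2)).flatMap (·.2))) := by
  induction cells with
  | nil => intro t s p; simp [PySem.Set.update]
  | cons c cs ih =>
      intro t s p
      simp only [List.foldl_cons, List.map_cons, List.flatMap_cons]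
      rcases hA : csA_cell items c.2 c.1 (t, s, p) with ⟨t', s', p'⟩
      have hc := cell_eq items h c.2 c.1 t s p
      rw [hA] at hc
      simp only [Prod.mk.injEq] at hc
      rw [ih t' s' p', hc.1, hc.2]
      simp [PySem.Set.update, List.foldl_append]

-- A's doubly nested loop over zs/ys is the fold over the flattened cell list
theorem nested_foldl_eq_flat {σ : Type} (g : Int → Int → σ → σ)
    (zs ys : List Int) (init : σ) :
    zs.foldl (fun st zi => ys.foldl (fun st yi => g zi yi st) st) init
      = (zs.flatMap (fun zi => ys.map (fun yi => (yi, zi)))).foldl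
          (fun st c => g c.2 c.1 st) init := by
  induction zs generalizing init with
  | nil => rfl
  | cons z zs ih =>
      simp only [List.foldl_cons, List.flatMap_cons, List.foldl_append, List.foldl_map]
      exact ih _

-- B's flattening loop over the per-cell pairs is one update by each flattened list
theorem pvFoldl_update_pair (specs : List (List String × List String))
    (t s : PySem.Set String) :
    specs.foldl (fun st p => (PySem.Set.update st.1 p.1, PySem.Set.update st.2 p.2)) (t, s)
      = (PySem.Set.update t (specs.flatMap (·.1)), PySem.Set.update s (specs.flatMap (·.2))) := by
  induction specs generalizing t s with
  | nil => simp [PySem.Set.update]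
  | cons p ps ih =>
      simp only [List.foldl_cons, List.flatMap_cons, ih]
      simp [PySem.Set.update, List.foldl_append]

theorem pvFlatMap_const_nil {α β : Type} (l : List α) :
    l.flatMap (fun _ => ([] : List β)) = [] := by
  induction l <;> simp_all

theorem pvCwDict_items_ne (crosswalk : List (Int × Int × Int)) (h : crosswalk ≠ []) :
    (pvCwDict crosswalk).items ≠ [] := by
  intro hi
  have hk : (pvCwDict crosswalk).keys = PySem.Set.update PySem.Dict.empty.keys (crosswalk.map (·.1)) :=
    PySem.Dict.keys_foldl_insert_key crosswalk (·.1) (fun _ p => p.2) PySem.Dict.empty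
  obtain ⟨q, rest, rfl⟩ := List.exists_cons_of_ne_nil h
  have : q.1 ∈ (pvCwDict (q :: rest)).keys := by
    rw [hk]
    rw [PySem.Set.mem_update]
    right; simp
  rw [show (pvCwDict (q :: rest)).keys = ((pvCwDict (q :: rest)).items.map (·.1)) from rfl, hi] at this
  simp at this

-- ===== VERDICT (by name: the statement is the Claim_ definition above) =====
theorem collision_safety_spec : Claim_equal_collision_safety := by
  intro ymin ymax zmin zmax cw _ hpre
  unfold Spec_collision_safety collision_safety collision_safety_alt
  dsimp only
  rcases hpre with hcw | hy | hz
  · rw [nested_foldl_eq_flat (fun zi yi st => csA_cell (pvCwDict cw).items zi yi st)]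
    rw [cells_eq (pvCwDict cw).items (pvCwDict_items_ne cw hcw) _
      PySem.Set.empty PySem.Set.empty "", pvFoldl_update_pair]
  · simp [PySem.List.pyRange_one_eq_nil hy, pvFlatMap_const_nil]
  · simp [PySem.List.pyRange_one_eq_nil hz]
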